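-- pv_equiv track=rewrite | github.com/Welu2/Exercises_a | 23-Jul-2025/Masha and Beautiful Tree 378914.py | is_sortable
-- ===== SOURCE A (Python) =====
-- def is_sortable(arr):
--     if len(arr) == 1:
--         return 0, arr
--
--     mid = len(arr) // 2
--     left = arr[:mid]
--     right = arr[mid:]
--
--     l_swaps, l_sorted = is_sortable(left)
--     if l_swaps == -1:
--         return -1, []
--
--     r_swaps, r_sorted = is_sortable(right)
--     if r_swaps == -1:
--         return -1, []
--
--     merged = l_sorted + r_sorted
--     if merged == sorted(merged):
--         return l_swaps + r_swaps, merged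
--     elif r_sorted + l_sorted == sorted(merged):
--         return l_swaps + r_swaps + 1, r_sorted + l_sorted
--     else:
--         return -1, []
-- ===== SOURCE B (Python) =====
-- def _solve(a):
--     # returns None on failure, else (swaps, lo, hi, sorted_list) where lo/hi are
--     # the first/last element of sorted_list (halves are always sorted, so the
--     # merge check is two O(1) boundary comparisons instead of a full sort)
--     if len(a) == 1:
--         return 0, a[0], a[0], a
--     mid = len(a) // 2
--     left = _solve(a[:mid])
--     if left is None:
--         return None
--     right = _solve(a[mid:])
--     if right is None:
--         return None
--     ls, llo, lhi, lst = left
--     rs, rlo, rhi, rst = right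
--     if lhi <= rlo:
--         return ls + rs, llo, rhi, lst + rst
--     if rhi <= llo:
--         return ls + rs + 1, rlo, lhi, rst + lst
--     return None
--
-- def is_sortable(arr):
--     res = _solve(arr)
--     if res is None:
--         return -1, []
--     return res[0], res[3]
-- ===== Notes on version B (the rewrite author's own statement) =====
-- stated objective: faster
-- what changed: B uses an Option-style helper that carries (swaps, min, max, sorted segment) up the recursion, so A's sorted(merged) full sort at every level is replaced by two O(1) comparisons of the tracked boundary values and the -1 sentinel plumbing disappears.
-- outside the precondition, e.g. on is_sortable([]): A raises RecursionError, B raises RecursionError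
import Mathlib
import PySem

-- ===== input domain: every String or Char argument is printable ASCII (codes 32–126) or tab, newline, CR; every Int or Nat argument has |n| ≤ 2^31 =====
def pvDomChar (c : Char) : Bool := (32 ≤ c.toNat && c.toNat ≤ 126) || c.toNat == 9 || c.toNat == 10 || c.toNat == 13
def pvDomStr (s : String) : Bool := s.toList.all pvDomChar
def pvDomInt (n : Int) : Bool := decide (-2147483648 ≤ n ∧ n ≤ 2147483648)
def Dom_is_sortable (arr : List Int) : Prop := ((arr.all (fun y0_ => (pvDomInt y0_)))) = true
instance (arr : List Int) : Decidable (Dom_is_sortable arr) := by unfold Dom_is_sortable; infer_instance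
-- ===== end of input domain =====

-- B carries (swaps, min, max, segment) up an Option-valued recursion, replacing A's sorted(merged) at every level by two boundary comparisons (asymptotically faster).


-- ===== PORT A =====
-- len(arr) == 1 is rendered as length ≤ 1 only to make the recursion total: on arr = [] the
-- Python recurses forever (RecursionError), which Pre_is_sortable excludes; arr[:mid]/arr[mid:]
-- with 0 ≤ mid are exactly take/drop.
def is_sortable (arr : List Int) : Int × List Int :=
  if _h : arr.length ≤ 1 then (0, arr)
  else
    let mid := arr.length / 2
    let l := is_sortable (arr.take mid)
    if l.1 == -1 then (-1, [])
    else
      let r := is_sortable (arr.drop mid)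
      if r.1 == -1 then (-1, [])
      else
        let merged := l.2 ++ r.2
        if merged == PySem.List.sorted merged (fun x => x) false then
          (l.1 + r.1, merged)
        else if r.2 ++ l.2 == PySem.List.sorted merged (fun x => x) false then
          (l.1 + r.1 + 1, r.2 ++ l.2)
        else (-1, [])
termination_by arr.length
decreasing_by all_goals · simp; omega

-- ===== PORT B =====
-- _solve returns none on failure; the length ≤ 1 guard (vs Python's == 1) is only the totality
-- completion for a = [], on which the Python recurses forever and which Pre_ excludes:
-- a.head?.map … is exactly 'return 0, a[0], a[0], a' for a singleton and none for [].
def pvSolve (a : List Int) : Option (Int × Int × Int × List Int) :=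
  if _h : a.length ≤ 1 then a.head?.map (fun x => (0, x, x, a))
  else
    let mid := a.length / 2
    match pvSolve (a.take mid) with
    | none => none
    | some (ls, llo, lhi, lst) =>
      match pvSolve (a.drop mid) with
      | none => none
      | some (rs, rlo, rhi, rst) =>
        if lhi ≤ rlo then some (ls + rs, llo, rhi, lst ++ rst)
        else if rhi ≤ llo then some (ls + rs + 1, rlo, lhi, rst ++ lst)
        else none
termination_by a.length
decreasing_by all_goals · simp; omega

def is_sortable_alt (arr : List Int) : Int × List Int :=
  match pvSolve arr with
  | none => (-1, [])
  | some (s, _, _, lst) => (s, lst)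

-- ===== PRECONDITION & SPEC =====
-- Pre_ excludes only arr = [], on which the Python A (and B) recurse forever (RecursionError).
def Pre_is_sortable (arr : List Int) : Prop := arr ≠ []
instance (arr : List Int) : Decidable (Pre_is_sortable arr) := by unfold Pre_is_sortable; infer_instance
def pvWitness_is_sortable : List Int := [3, 2, 1, 4]

def Spec_is_sortable (arr : List Int) (out : Int × List Int) : Prop := out = is_sortable_alt arr
instance (arr : List Int) (out : Int × List Int) : Decidable (Spec_is_sortable arr out) := by unfold Spec_is_sortable; infer_instance

-- ===== CLAIM (what is proved, stated in full; the proofs are below) =====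
def Claim_equal_is_sortable : Prop := ∀ (arr : List Int), Dom_is_sortable arr → Pre_is_sortable arr → Spec_is_sortable arr (is_sortable arr)

-- ===== LEMMAS AND PROOFS =====

-- a sorted list is bounded by its last element / below by its head
theorem pv_le_getLast : ∀ (L : List Int), L.Pairwise (· ≤ ·) → ∀ (a : Int), a ∈ L → ∀ (hne : L ≠ []), a ≤ L.getLast hne := by
  intro L
  induction L with
  | nil => simp
  | cons x xs ih =>
    intro hL a h hne
    cases xs with
    | nil => simp at h; simp [h]
    | cons y ys =>
      rw [List.getLast_cons (by simp)]
      rcases (List.mem_cons.mp h) with h | h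
      · subst h
        exact List.rel_of_pairwise_cons hL (List.getLast_mem _)
      · exact ih (List.pairwise_cons.mp hL).2 a h (by simp)

theorem pv_head_le : ∀ (L : List Int), L.Pairwise (· ≤ ·) → ∀ (a : Int), a ∈ L → ∀ (hne : L ≠ []), L.head hne ≤ a := by
  intro L
  induction L with
  | nil => simp
  | cons x xs ih =>
    intro hL a h _
    rcases (List.mem_cons.mp h) with h | h
    · simp [h]
    · exact List.rel_of_pairwise_cons hL h

theorem pv_cond1_iff (L R : List Int) (hL : L.Pairwise (· ≤ ·)) (hR : R.Pairwise (· ≤ ·))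
    (hLne : L ≠ []) (hRne : R ≠ []) :
    L ++ R = PySem.List.sorted (L ++ R) (fun x => x) false ↔ L.getLast hLne ≤ R.head hRne := by
  constructor
  · intro hEq
    have hp : (L ++ R).Pairwise (· ≤ ·) := by
      rw [hEq]; exact PySem.List.sorted_pairwise (L ++ R) (fun x => x)
    exact (List.pairwise_append.mp hp).2.2 _ (List.getLast_mem hLne) _ (List.head_mem hRne)
  · intro hb
    have hp : (L ++ R).Pairwise (· ≤ ·) := by
      refine List.pairwise_append.mpr ⟨hL, hR, ?_⟩
      intro a ha b hb'
      exact le_trans (pv_le_getLast L hL a ha hLne) (le_trans hb (pv_head_le R hR b hb' hRne))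
    exact (PySem.List.sorted_eq_self_of_pairwise _ _ hp).symm

theorem pv_cond2_iff (L R : List Int) (hL : L.Pairwise (· ≤ ·)) (hR : R.Pairwise (· ≤ ·))
    (hLne : L ≠ []) (hRne : R ≠ []) :
    R ++ L = PySem.List.sorted (L ++ R) (fun x => x) false ↔ R.getLast hRne ≤ L.head hLne := by
  constructor
  · intro hEq
    have hp : (R ++ L).Pairwise (· ≤ ·) := by
      rw [hEq]; exact PySem.List.sorted_pairwise (L ++ R) (fun x => x)
    exact (List.pairwise_append.mp hp).2.2 _ (List.getLast_mem hRne) _ (List.head_mem hLne)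
  · intro hb
    have hp : (R ++ L).Pairwise (· ≤ ·) := by
      refine List.pairwise_append.mpr ⟨hR, hL, ?_⟩
      intro a ha b hb'
      exact le_trans (pv_le_getLast R hR a ha hRne) (le_trans hb (pv_head_le L hL b hb' hLne))
    exact (PySem.List.sorted_id_eq_of_perm_of_pairwise _ _ (List.perm_append_comm) hp).symm

-- main invariant: A and B's helper agree, and a successful result is the sorted segment
-- together with its head and last element
theorem is_sortable_main : ∀ (n : Nat) (arr : List Int), arr.length = n → arr ≠ [] →
    (is_sortable arr = (-1, []) ∧ pvSolve arr = none) ∨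
      (∃ (s : Int) (L : List Int) (hne : L ≠ []),
        is_sortable arr = (s, L) ∧ pvSolve arr = some (s, L.head hne, L.getLast hne, L) ∧
        L.Pairwise (· ≤ ·) ∧ 0 ≤ s) := by
  intro n
  induction n using Nat.strong_induction_on with
  | _ n ih =>
    intro arr hlen hne
    by_cases h1 : arr.length ≤ 1
    · obtain ⟨x, xs, rfl⟩ := List.exists_cons_of_ne_nil hne
      have hxs : xs = [] := by
        have := List.length_cons (a := x) (as := xs)
        refine List.eq_nil_of_length_eq_zero (by omega)
      subst hxs
      right
      refine ⟨0, [x], by simp, ?_, ?_, by simp, le_refl 0⟩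
      · rw [is_sortable]; simp
      · rw [pvSolve]; simp
    · have hmid1 : 1 ≤ arr.length / 2 := by omega
      have hmid2 : arr.length / 2 < arr.length := by omega
      set mid := arr.length / 2 with hmdef
      have hLlen : (arr.take mid).length = mid := by simp; omega
      have hRlen : (arr.drop mid).length = arr.length - mid := by simp
      have hLne : arr.take mid ≠ [] := by
        intro h; rw [h] at hLlen; simp at hLlen; omega
      have hRne : arr.drop mid ≠ [] := by
        intro h; rw [h] at hRlen; simp at hRlen; omega
      have ihL := ih (arr.take mid).length (by omega) (arr.take mid) rfl hLne
      have ihR := ih (arr.drop mid).length (by omega) (arr.drop mid) rfl hRne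
      rw [is_sortable, pvSolve]
      simp only [dif_neg h1, ← hmdef]
      rcases ihL with ⟨hA, hB⟩ | ⟨sL, L, hLne2, hAL, hBL, hLp, hLpos⟩
      · left
        rw [hA, hB]
        simp
      · rw [hAL, hBL]
        rw [if_neg (show ¬ ((sL == -1) = true) by simp; omega)]
        rcases ihR with ⟨hA, hB⟩ | ⟨sR, R, hRne2, hAR, hBR, hRp, hRpos⟩
        · left
          rw [hA, hB]
          simp
        · rw [hAR, hBR]
          rw [if_neg (show ¬ ((sR == -1) = true) by simp; omega)]
          dsimp only
          by_cases hc1 : L.getLast hLne2 ≤ R.head hRne2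
          · have hs := (pv_cond1_iff L R hLp hRp hLne2 hRne2).mpr hc1
            rw [if_pos (by exact beq_iff_eq.mpr hs), if_pos hc1]
            right
            have hLRne : L ++ R ≠ [] := by simp [hLne2]
            refine ⟨sL + sR, L ++ R, hLRne, rfl, ?_, by rw [hs]; exact PySem.List.sorted_pairwise _ _, by omega⟩
            rw [List.head_append_of_ne_nil hLne2, List.getLast_append_of_right_ne_nil _ _ hRne2]
          · have hnc1 : ¬ ((L ++ R == PySem.List.sorted (L ++ R) (fun x => x) false) = true) := by
              simp only [beq_iff_eq]
              exact fun h => hc1 ((pv_cond1_iff L R hLp hRp hLne2 hRne2).mp h)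
            rw [if_neg hnc1, if_neg hc1]
            by_cases hc2 : R.getLast hRne2 ≤ L.head hLne2
            · have hs := (pv_cond2_iff L R hLp hRp hLne2 hRne2).mpr hc2
              rw [if_pos (by exact beq_iff_eq.mpr hs), if_pos hc2]
              right
              have hRLne : R ++ L ≠ [] := by simp [hRne2]
              refine ⟨sL + sR + 1, R ++ L, hRLne, rfl, ?_, by rw [hs]; exact PySem.List.sorted_pairwise _ _, by omega⟩
              rw [List.head_append_of_ne_nil hRne2, List.getLast_append_of_right_ne_nil _ _ hLne2]
            · have hnc2 : ¬ ((R ++ L == PySem.List.sorted (L ++ R) (fun x => x) false) = true) := by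
                simp only [beq_iff_eq]
                exact fun h => hc2 ((pv_cond2_iff L R hLp hRp hLne2 hRne2).mp h)
              rw [if_neg hnc2, if_neg hc2]
              left
              exact ⟨rfl, rfl⟩

-- ===== VERDICT (by name: the statement is the Claim_ definition above) =====
theorem is_sortable_spec : Claim_equal_is_sortable := by
  intro arr _ hpre
  unfold Spec_is_sortable is_sortable_alt
  rcases is_sortable_main arr.length arr rfl hpre with ⟨hA, hB⟩ | ⟨s, L, hne, hA, hB, _, _⟩
  · rw [hA, hB]
  · rw [hA, hB]
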